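-- pv_equiv track=rewrite | github.com/dominikjalowiecki/Programming-Projects | google_foobar/Level 2/please_pass_the_coded_messages.py | get_max_number
-- ===== SOURCE A (Python) =====
-- def get_max_number(l):
--     list_sum = sum(l)
--     if list_sum % 3 == 0:
--         return l
--
--     max_list = []
--     tmp_max_list = []
--
--     for i in range(len(l)):
--         items = l[:i]
--         items.extend(l[i+1:])
--
--         tmp_max_list = get_max_number(items)
--         if len(tmp_max_list) > len(max_list):
--             max_list = tmp_max_list
--
--     return max_list
-- ===== SOURCE B (Python) =====
-- def get_max_number(l):
--     r = sum(l) % 3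
--     if r == 0:
--         return l
--     if any(x % 3 == r for x in l):
--         k, need = r, 1
--     else:
--         k, need = 3 - r, 2
--     out = []
--     for x in l:
--         if need > 0 and x % 3 == k:
--             need -= 1
--         else:
--             out.append(x)
--     return out
-- ===== Notes on version B (the rewrite author's own statement) =====
-- stated objective: faster
-- what changed: Replaced the branching recursion over element removals by a single mod-3 residue analysis: compute sum % 3 and delete the earliest one element of residue r, or the earliest two of residue 3-r, in one linear pass; intended as faster (a timing run measured A timing out at n=16 where B still returned, so no clean ratio).
import Mathlib
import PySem

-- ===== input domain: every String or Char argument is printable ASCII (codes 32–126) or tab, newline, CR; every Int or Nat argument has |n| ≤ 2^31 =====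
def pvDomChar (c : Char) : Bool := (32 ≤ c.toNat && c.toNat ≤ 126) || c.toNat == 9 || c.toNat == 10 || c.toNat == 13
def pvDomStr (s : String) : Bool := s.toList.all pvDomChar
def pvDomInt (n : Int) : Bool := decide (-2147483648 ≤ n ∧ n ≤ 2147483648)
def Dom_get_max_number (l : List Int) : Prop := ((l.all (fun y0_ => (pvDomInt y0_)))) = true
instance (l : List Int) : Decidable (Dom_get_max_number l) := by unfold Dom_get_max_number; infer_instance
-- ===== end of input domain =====

-- B replaces A's branching recursion over removals by a one-pass mod-3 residue analysis; intended as faster (a timing run measured A timing out at n=16 where B returned, no clean ratio).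

-- ===== PORT A =====
-- literal port of A: try removing each index, recurse, keep the first strictly longer result
def get_max_number (l : List Int) : List Int :=
  if PySem.Int.mod l.sum 3 = 0 then l
  else
    (List.range l.length).attach.foldl
      (fun max_list i =>
        let items := l.take i.1 ++ l.drop (i.1 + 1)
        let tmp_max_list := get_max_number items
        if max_list.length < tmp_max_list.length then tmp_max_list else max_list) []
termination_by l.length
decreasing_by
  have hi := List.mem_range.mp i.2
  simp [List.length_append, List.length_take, List.length_drop]
  omega

-- ===== PORT B =====
-- the for-loop of Source B: remove the first `need` elements of residue k, keep the rest in order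
def altLoop (k : Int) : Nat → List Int → List Int → List Int
  | _, out, [] => out
  | need, out, x :: xs =>
    if 0 < need ∧ PySem.Int.mod x 3 = k then altLoop k (need - 1) out xs
    else altLoop k need (out ++ [x]) xs

def get_max_number_alt (l : List Int) : List Int :=
  let r := PySem.Int.mod l.sum 3
  if r = 0 then l
  else if l.any (fun x => PySem.Int.mod x 3 = r) then altLoop r 1 [] l
  else altLoop (3 - r) 2 [] l

-- ===== PRECONDITION & SPEC =====
def Spec_get_max_number (l : List Int) (out : List Int) : Prop := out = get_max_number_alt l
instance (l : List Int) (out : List Int) : Decidable (Spec_get_max_number l out) := by unfold Spec_get_max_number; infer_instance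

-- ===== CLAIM (what is proved, stated in full; the proofs are below) =====
def Claim_equal_get_max_number : Prop := ∀ (l : List Int), Dom_get_max_number l → Spec_get_max_number l (get_max_number l)

-- ===== LEMMAS AND PROOFS =====

-- PySem mod 3 is Int emod
theorem pm3 (x : Int) : PySem.Int.mod x 3 = x % 3 :=
  PySem.Int.mod_eq_emod_of_pos (by norm_num)

-- accumulator-free form of altLoop
def dropRes (k : Int) : Nat → List Int → List Int
  | _, [] => []
  | need, x :: xs =>
    if 0 < need ∧ PySem.Int.mod x 3 = k then dropRes k (need - 1) xs
    else x :: dropRes k need xs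

theorem altLoop_eq (k : Int) (xs : List Int) : ∀ (need : Nat) (out : List Int),
    altLoop k need out xs = out ++ dropRes k need xs := by
  induction xs with
  | nil => intro need out; simp [altLoop, dropRes]
  | cons x xs ih =>
    intro need out
    simp only [altLoop, dropRes]
    split
    · rw [ih]
    · rw [ih]; simp

theorem dropRes_zero (k : Int) (xs : List Int) : dropRes k 0 xs = xs := by
  induction xs with
  | nil => rfl
  | cons x xs ih => simp [dropRes, ih]

theorem dropRes_le (k : Int) : ∀ (need : Nat) (xs : List Int),
    (dropRes k need xs).length ≤ xs.length := by
  intro need xs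
  induction xs generalizing need with
  | nil => simp [dropRes]
  | cons x xs ih =>
    simp only [dropRes]
    split
    · exact le_trans (ih _) (by simp)
    · simpa using ih need

theorem dropRes_lt (k : Int) : ∀ (need : Nat) (xs : List Int), 0 < need →
    (∃ x ∈ xs, PySem.Int.mod x 3 = k) → (dropRes k need xs).length < xs.length := by
  intro need xs
  induction xs generalizing need with
  | nil => simp
  | cons x xs ih =>
    intro hneed hex
    simp only [dropRes]
    split
    · have := dropRes_le k (need - 1) xs
      simpa using Nat.lt_succ_of_le this
    · rename_i hcond
      have hx : ¬ PySem.Int.mod x 3 = k := fun h => hcond ⟨hneed, h⟩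
      obtain ⟨y, hy, hyk⟩ := hex
      rcases List.mem_cons.mp hy with h | h
      · exact absurd (h ▸ hyk) hx
      · simpa using ih need hneed ⟨y, h, hyk⟩

theorem dropRes_skip (k : Int) (need : Nat) (u rest : List Int)
    (h : ∀ x ∈ u, ¬ PySem.Int.mod x 3 = k) :
    dropRes k need (u ++ rest) = u ++ dropRes k need rest := by
  induction u with
  | nil => simp
  | cons x xs ih =>
    have hx := h x (by simp)
    simp only [List.cons_append, dropRes]
    rw [if_neg (fun hc => hx hc.2), ih (fun y hy => h y (by simp [hy]))]

theorem sum_zero_residues (l : List Int) (h : ∀ x ∈ l, x % 3 = 0) : l.sum % 3 = 0 := by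
  induction l with
  | nil => simp
  | cons x xs ih =>
    have hx := h x (by simp)
    have hxs := ih (fun y hy => h y (by simp [hy]))
    simp only [List.sum_cons]
    omega

theorem exists_nonzero (l : List Int) (h : l.sum % 3 ≠ 0) : ∃ x ∈ l, x % 3 ≠ 0 := by
  by_contra hc
  push Not at hc
  exact h (sum_zero_residues l hc)

theorem firstSplit (p : Int → Prop) [DecidablePred p] :
    ∀ (l : List Int), (∃ x ∈ l, p x) →
      ∃ u a v, l = u ++ a :: v ∧ p a ∧ ∀ x ∈ u, ¬ p x := by
  intro l h
  induction l with
  | nil => simp at h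
  | cons x xs ih =>
    by_cases hx : p x
    · exact ⟨[], x, xs, by simp, hx, by simp⟩
    · obtain ⟨y, hy, hpy⟩ := h
      rcases List.mem_cons.mp hy with h' | h'
      · exact absurd (h' ▸ hpy) hx
      · obtain ⟨u, a, v, he, hpa, hu⟩ := ih ⟨y, h', hpy⟩
        exact ⟨x :: u, a, v, by simp [he], hpa, by
          intro z hz
          rcases List.mem_cons.mp hz with h'' | h''
          · exact h'' ▸ hx
          · exact hu z h''⟩

theorem sum_eraseIdx (l : List Int) : ∀ (i : Nat) (h : i < l.length),
    (l.eraseIdx i).sum = l.sum - l[i] := by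
  induction l with
  | nil => simp
  | cons x xs ih =>
    intro i hi
    cases i with
    | zero => simp [List.eraseIdx]
    | succ n =>
      have hn : n < xs.length := by simpa using hi
      simp only [List.eraseIdx, List.sum_cons, List.getElem_cons_succ]
      rw [ih n hn]; ring

-- generic length bounds for B
-- one-step unfolding of B's port
theorem alt_def (l : List Int) : get_max_number_alt l =
    (if PySem.Int.mod l.sum 3 = 0 then l
     else if l.any (fun x => PySem.Int.mod x 3 = PySem.Int.mod l.sum 3) then
       altLoop (PySem.Int.mod l.sum 3) 1 [] l
     else altLoop (3 - PySem.Int.mod l.sum 3) 2 [] l) := rfl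

theorem alt_length_le (l : List Int) : (get_max_number_alt l).length ≤ l.length := by
  rw [alt_def]
  split
  · exact le_refl _
  · split
    · rw [altLoop_eq]; simpa using dropRes_le _ _ l
    · rw [altLoop_eq]; simpa using dropRes_le _ _ l

theorem alt_length_lt (l : List Int) (h : PySem.Int.mod l.sum 3 ≠ 0) :
    (get_max_number_alt l).length < l.length := by
  rw [alt_def, if_neg h]
  split
  · rename_i hany
    rw [altLoop_eq]
    obtain ⟨x, hx, hxr⟩ := List.any_eq_true.mp hany
    simpa using dropRes_lt _ 1 l (by omega) ⟨x, hx, of_decide_eq_true hxr⟩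
  · rename_i hany
    rw [altLoop_eq]
    have hr := pm3 l.sum
    have hsum : l.sum % 3 ≠ 0 := by rw [← hr]; exact h
    obtain ⟨x, hx, hx0⟩ := exists_nonzero l hsum
    have hxr : ¬ PySem.Int.mod x 3 = PySem.Int.mod l.sum 3 := by
      intro hc
      exact hany (List.any_eq_true.mpr ⟨x, hx, decide_eq_true hc⟩)
    have hx3 : PySem.Int.mod x 3 = 3 - PySem.Int.mod l.sum 3 := by
      rw [pm3 x, pm3 l.sum] at hxr ⊢
      omega
    simpa using dropRes_lt _ 2 l (by omega) ⟨x, hx, hx3⟩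

-- fold machinery
theorem fold_stable (F : Nat → List Int) (s : List Int) (ys : List Nat)
    (h : ∀ i ∈ ys, (F i).length ≤ s.length) :
    ys.foldl (fun ml i => if ml.length < (F i).length then F i else ml) s = s := by
  induction ys with
  | nil => rfl
  | cons y ys ih =>
    simp only [List.foldl_cons]
    rw [if_neg (by have := h y (by simp); omega)]
    exact ih (fun i hi => h i (by simp [hi]))

theorem fold_small (F : Nat → List Int) (M : Nat) :
    ∀ (ys : List Nat) (s : List Int), (∀ i ∈ ys, (F i).length < M) → s.length < M →
    ((ys.foldl (fun ml i => if ml.length < (F i).length then F i else ml) s).length < M) := by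
  intro ys
  induction ys with
  | nil => intro s _ hs; exact hs
  | cons y ys ih =>
    intro s h hs
    simp only [List.foldl_cons]
    split
    · exact ih _ (fun i hi => h i (by simp [hi])) (h y (by simp))
    · exact ih _ (fun i hi => h i (by simp [hi])) hs

theorem fold_firstmax (F : Nat → List Int) (n j : Nat) (hj : j < n)
    (hlt : ∀ i, i < j → (F i).length < (F j).length)
    (hle : ∀ i, j < i → i < n → (F i).length ≤ (F j).length) :
    (List.range n).foldl (fun ml i => if ml.length < (F i).length then F i else ml) [] = F j := by
  have hr : List.range n = (List.range j ++ [j]) ++ (List.range (n - (j+1))).map ((j+1) + ·) := by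
    rw [← List.range_succ, ← List.range_add]
    congr 1
    omega
  rw [hr, List.foldl_append, List.foldl_append]
  have hstep :
      List.foldl (fun ml i => if ml.length < (F i).length then F i else ml)
        (List.foldl (fun ml i => if ml.length < (F i).length then F i else ml) [] (List.range j))
        [j] = F j := by
    simp only [List.foldl_cons, List.foldl_nil]
    by_cases hM : (F j).length = 0
    · have hj0 : j = 0 := by
        by_contra hj0
        have := hlt 0 (by omega)
        omega
      subst hj0
      simp only [List.range_zero, List.foldl_nil, List.length_nil]
      rw [if_neg (by omega)]
      exact (List.length_eq_zero_iff.mp hM).symm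
    · have hs := fold_small F (F j).length (List.range j) []
        (fun i hi => hlt i (List.mem_range.mp hi)) (by simp; omega)
      rw [if_pos hs]
  rw [hstep]
  exact fold_stable F (F j) _ (by
    intro i hi
    obtain ⟨t, ht, rfl⟩ := List.mem_map.mp hi
    exact hle _ (by omega) (by have := List.mem_range.mp ht; omega))

-- the main equivalence, by strong induction on the length
theorem erase_len (l : List Int) (i : Nat) (h : i < l.length) :
    (l.eraseIdx i).length = l.length - 1 := by
  rw [List.length_eraseIdx]
  simp [h]

theorem main_eq : ∀ (l : List Int), get_max_number l = get_max_number_alt l := by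
  suffices H : ∀ (n : Nat) (l : List Int), l.length < n →
      get_max_number l = get_max_number_alt l by
    intro l; exact H (l.length + 1) l (by omega)
  intro n
  induction n with
  | zero => intro l h; omega
  | succ n ih =>
    intro l hl
    by_cases hr0 : PySem.Int.mod l.sum 3 = 0
    · rw [get_max_number, if_pos hr0, alt_def, if_pos hr0]
    · -- bridge A's fold to a fold over indices of B's value on the erased list
      have hbridge : get_max_number l =
          (List.range l.length).foldl
            (fun ml i => if ml.length < (get_max_number_alt (l.eraseIdx i)).length
                         then get_max_number_alt (l.eraseIdx i) else ml) [] := by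
        rw [get_max_number, if_neg hr0]
        have h1 : (List.range l.length).attach.foldl
            (fun max_list i =>
              let items := l.take i.1 ++ l.drop (i.1 + 1)
              let tmp_max_list := get_max_number items
              if max_list.length < tmp_max_list.length then tmp_max_list else max_list) [] =
            (List.range l.length).foldl
            (fun max_list i =>
              let items := l.take i ++ l.drop (i + 1)
              let tmp_max_list := get_max_number items
              if max_list.length < tmp_max_list.length then tmp_max_list else max_list) [] :=
          List.foldl_attach (l := List.range l.length)
            (f := fun max_list i =>
              let items := l.take i ++ l.drop (i + 1)
              let tmp_max_list := get_max_number items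
              if max_list.length < tmp_max_list.length then tmp_max_list else max_list)
            (b := [])
        rw [h1]
        apply PySem.List.foldl_congr_mem
        intro acc i hi
        have hi' := List.mem_range.mp hi
        have he : l.take i ++ l.drop (i + 1) = l.eraseIdx i :=
          (List.eraseIdx_eq_take_drop_succ l i).symm
        have hlen' : (l.eraseIdx i).length < n := by
          rw [erase_len l i hi']; omega
        simp only [he, ih (l.eraseIdx i) hlen']
      have hrs : l.sum % 3 = PySem.Int.mod l.sum 3 := (pm3 l.sum).symm
      have hrb : PySem.Int.mod l.sum 3 = 1 ∨ PySem.Int.mod l.sum 3 = 2 := by omega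
      by_cases hany : ∃ x ∈ l, PySem.Int.mod x 3 = PySem.Int.mod l.sum 3
      · -- one element of residue r exists: both remove the earliest one
        obtain ⟨u, a, v, hsplit, ha, hu⟩ :=
          firstSplit (fun x => PySem.Int.mod x 3 = PySem.Int.mod l.sum 3) l hany
        have hlen : l.length = u.length + v.length + 1 := by
          rw [hsplit]; simp; omega
        have hsums : l.sum = u.sum + (a + v.sum) := by
          rw [hsplit]; simp
        have hBval : get_max_number_alt l = u ++ v := by
          rw [alt_def, if_neg hr0,
            if_pos (List.any_eq_true.mpr ⟨a, by rw [hsplit]; simp, decide_eq_true ha⟩),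
            altLoop_eq]
          generalize hg : PySem.Int.mod l.sum 3 = r at ha hu ⊢
          rw [hsplit, dropRes_skip _ _ _ _ hu]
          simp only [dropRes, ha, and_true, if_pos (by omega : 0 < 1)]
          rw [dropRes_zero]
          simp
        have hFj : get_max_number_alt (l.eraseIdx u.length) = u ++ v := by
          have he : l.eraseIdx u.length = u ++ v := by
            rw [hsplit, List.eraseIdx_append_of_length_le (le_refl u.length)]
            simp
          have hsum0 : PySem.Int.mod (u ++ v).sum 3 = 0 := by
            have h1 : (u ++ v).sum = u.sum + v.sum := by simp
            have ha' : a % 3 = PySem.Int.mod l.sum 3 := by rw [← pm3]; exact ha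
            rw [pm3]; omega
          rw [he, alt_def, if_pos hsum0]
        have hfold := fold_firstmax (fun i => get_max_number_alt (l.eraseIdx i))
          l.length u.length (by omega)
          (by
            intro i hiu
            have hil : i < l.length := by omega
            simp only [hFj]
            have hsub : (l.eraseIdx i).sum = l.sum - l[i] := sum_eraseIdx l i hil
            have hmem : l[i] ∈ u := by
              have : l[i] = u[i]'(by omega) := by
                rw [List.getElem_of_eq hsplit, List.getElem_append_left]
              rw [this]; exact List.getElem_mem _
            have hne : ¬ (l[i] % 3 = PySem.Int.mod l.sum 3) := by
              have := hu _ hmem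
              rw [pm3] at this; exact this
            have hsne : PySem.Int.mod (l.eraseIdx i).sum 3 ≠ 0 := by
              rw [pm3, hsub]; omega
            have := alt_length_lt _ hsne
            rw [erase_len l i hil] at this
            simp only [List.length_append]
            omega)
          (by
            intro i _ hil
            simp only [hFj]
            have := alt_length_le (l.eraseIdx i)
            rw [erase_len l i hil] at this
            simp only [List.length_append]
            omega)
        exact hbridge.trans (hfold.trans (hFj.trans hBval.symm))
      · -- no element of residue r: both remove the earliest two of residue 3 - r
        have hall : ∀ x ∈ l, ¬ PySem.Int.mod x 3 = PySem.Int.mod l.sum 3 := by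
          push Not at hany; exact hany
        have hall' : ∀ x ∈ l, x % 3 = 0 ∨ x % 3 = 3 - PySem.Int.mod l.sum 3 := by
          intro x hx
          have := hall x hx
          rw [pm3] at this
          omega
        obtain ⟨x0, hx0l, hx00⟩ := exists_nonzero l (by omega)
        obtain ⟨u, a, t, hsplit1, ha, hu⟩ :=
          firstSplit (fun x => PySem.Int.mod x 3 = 3 - PySem.Int.mod l.sum 3) l
            ⟨x0, hx0l, by
              show PySem.Int.mod x0 3 = 3 - PySem.Int.mod l.sum 3
              rw [pm3 x0]
              rcases hall' x0 hx0l with h | h <;> omega⟩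
        have hu0 : ∀ x ∈ u, x % 3 = 0 := by
          intro x hx
          have h1 := hu x hx
          rw [pm3] at h1
          rcases hall' x (by rw [hsplit1]; simp [hx]) with h | h <;> omega
        have ha' : a % 3 = 3 - PySem.Int.mod l.sum 3 := by rw [← pm3]; exact ha
        have hsums1 : l.sum = u.sum + (a + t.sum) := by rw [hsplit1]; simp
        have husum : u.sum % 3 = 0 := sum_zero_residues u hu0
        have htsum : t.sum % 3 ≠ 0 := by omega
        obtain ⟨y0, hy0t, hy00⟩ := exists_nonzero t htsum
        obtain ⟨v, b, w, hsplit2, hb, hv⟩ :=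
          firstSplit (fun x => PySem.Int.mod x 3 = 3 - PySem.Int.mod l.sum 3) t
            ⟨y0, hy0t, by
              show PySem.Int.mod y0 3 = 3 - PySem.Int.mod l.sum 3
              rw [pm3 y0]
              rcases hall' y0 (by rw [hsplit1]; simp [hy0t]) with h | h <;> omega⟩
        have hv0 : ∀ x ∈ v, x % 3 = 0 := by
          intro x hx
          have h1 := hv x hx
          rw [pm3] at h1
          rcases hall' x (by rw [hsplit1, hsplit2]; simp [hx]) with h | h <;> omega
        have hb' : b % 3 = 3 - PySem.Int.mod l.sum 3 := by rw [← pm3]; exact hb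
        have hsplit : l = u ++ a :: (v ++ b :: w) := by rw [hsplit1, hsplit2]
        have hlen : l.length = u.length + v.length + w.length + 2 := by
          rw [hsplit]; simp; omega
        have hsums : l.sum = u.sum + (a + (v.sum + (b + w.sum))) := by
          rw [hsplit]; simp
        have hvsum : v.sum % 3 = 0 := sum_zero_residues v hv0
        -- the value removing the first two residue-(3-r) elements, from a list with prefix p of zeros
        have hdrop2 : ∀ (p : List Int), (∀ x ∈ p, x % 3 = 0) →
            dropRes (3 - PySem.Int.mod l.sum 3) 2 (p ++ a :: (v ++ b :: w)) =
              p ++ (v ++ w) := by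
          intro p hp
          rw [dropRes_skip _ _ _ _ (by intro x hx; rw [pm3]; have := hp x hx; omega)]
          congr 1
          simp only [dropRes, ha, and_true, if_pos (by omega : 0 < 2)]
          rw [dropRes_skip _ _ _ _ (by intro x hx; rw [pm3]; have := hv0 x hx; omega)]
          congr 1
          simp only [dropRes, hb, and_true, if_pos (by omega : 0 < 1)]
          rw [dropRes_zero]
        have hBval : get_max_number_alt l = u ++ (v ++ w) := by
          rw [alt_def, if_neg hr0, if_neg (by
            intro hc
            obtain ⟨x, hx, hdx⟩ := List.any_eq_true.mp hc
            exact hall x hx (of_decide_eq_true hdx)), altLoop_eq]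
          generalize hg : PySem.Int.mod l.sum 3 = r at hdrop2 ⊢
          rw [hsplit, hdrop2 u hu0]
          simp
        -- value of B on a sublist whose sum has residue 3-r and that still contains b
        have hFj : get_max_number_alt (l.eraseIdx u.length) = u ++ (v ++ w) := by
          have he : l.eraseIdx u.length = u ++ (v ++ b :: w) := by
            rw [hsplit, List.eraseIdx_append_of_length_le (le_refl u.length)]
            simp
          have hsum' : (u ++ (v ++ b :: w)).sum = l.sum - a := by
            simp only [List.sum_append, List.sum_cons] at hsums ⊢
            omega
          have hsr : PySem.Int.mod (u ++ (v ++ b :: w)).sum 3 =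
              3 - PySem.Int.mod l.sum 3 := by
            rw [pm3, hsum']; omega
          rw [he, alt_def, if_neg (by omega), if_pos (List.any_eq_true.mpr
            ⟨b, by simp, decide_eq_true (by rw [hsr]; exact hb)⟩), hsr, altLoop_eq]
          simp only [List.nil_append]
          rw [dropRes_skip _ _ _ _ (by intro x hx; rw [pm3 x]; have := hu0 x hx; omega),
            dropRes_skip _ _ _ _ (by intro x hx; rw [pm3 x]; have := hv0 x hx; omega)]
          have hbw : dropRes (3 - PySem.Int.mod l.sum 3) 1 (b :: w) = w := by
            simp only [dropRes, hb, and_true, if_pos (by omega : 0 < 1)]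
            exact dropRes_zero _ w
          rw [hbw]
        have hfold := fold_firstmax (fun i => get_max_number_alt (l.eraseIdx i))
          l.length u.length (by omega)
          (by
            intro i hiu
            have hil : i < l.length := by omega
            simp only [hFj]
            -- the erased list keeps a and b; B removes both, giving length l.length - 3
            have he : l.eraseIdx i = u.eraseIdx i ++ (a :: (v ++ b :: w)) := by
              rw [hsplit, List.eraseIdx_append_of_lt_length hiu]
            have hsub : (l.eraseIdx i).sum = l.sum - l[i] := sum_eraseIdx l i hil
            have hmem : l[i] ∈ u := by
              have : l[i] = u[i]'(by omega) := by
                rw [List.getElem_of_eq hsplit, List.getElem_append_left]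
              rw [this]; exact List.getElem_mem _
            have hi0 : l[i] % 3 = 0 := hu0 _ hmem
            have hsr : PySem.Int.mod (l.eraseIdx i).sum 3 = PySem.Int.mod l.sum 3 := by
              rw [pm3, hsub]; omega
            have hval : get_max_number_alt (l.eraseIdx i) =
                u.eraseIdx i ++ (v ++ w) := by
              rw [alt_def, if_neg (by rw [hsr]; exact hr0), if_neg (by
                intro hc
                obtain ⟨x, hx, hdx⟩ := List.any_eq_true.mp hc
                have hxl : x ∈ l := (List.eraseIdx_sublist l i).subset hx
                rw [hsr] at hdx
                exact hall x hxl (of_decide_eq_true hdx)), hsr, altLoop_eq]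
              conv_lhs => rw [he]
              rw [hdrop2 (u.eraseIdx i)
                (fun x hx => hu0 x ((List.eraseIdx_sublist u i).subset hx))]
              simp
            rw [hval]
            have : (u.eraseIdx i).length = u.length - 1 := erase_len u i hiu
            simp only [List.length_append]
            omega)
          (by
            intro i hji hil
            simp only [hFj]
            have hsub : (l.eraseIdx i).sum = l.sum - l[i] := sum_eraseIdx l i hil
            have hne := hall _ (List.getElem_mem hil)
            rw [pm3] at hne
            have hsne : PySem.Int.mod (l.eraseIdx i).sum 3 ≠ 0 := by
              rw [pm3, hsub]; omega
            have := alt_length_lt _ hsne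
            rw [erase_len l i hil] at this
            simp only [List.length_append]
            omega)
        exact hbridge.trans (hfold.trans (hFj.trans hBval.symm))

-- ===== VERDICT (by name: the statement is the Claim_ definition above) =====
theorem get_max_number_spec : Claim_equal_get_max_number := by
  intro l _
  unfold Spec_get_max_number
  exact main_eq l
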